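-- pv_equiv track=rewrite | github.com/qroam/web-document-discourse-parsing | visualization/structure_generator_new.py | check_satisfiability
-- ===== SOURCE A (Python) =====
-- def check_satisfiability(children_continue_blocks_list):
--     zero = 0
--     one = 0
--     multiple = 0
--     for children_continue_block in children_continue_blocks_list:
--         if len(children_continue_block) == 0:
--             zero += 1
--         elif len(children_continue_block) == 1:
--             one += 1
--         elif len(children_continue_block) > 1:
--             multiple += 1
--     if multiple > 1:
--         return False
--     elif multiple == 1:
--         if one > 0:
--             return False
--         else:
--             return True
--     else:
--         return True
-- ===== SOURCE B (Python) =====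
-- def check_satisfiability(children_continue_blocks_list):
--     # Early-exit recursive scan: carry two flags (seen a singleton block,
--     # seen a multi block) and fail as soon as a conflict is certain.
--     def go(i, seen_one, seen_multiple):
--         if i == len(children_continue_blocks_list):
--             return True
--         n = len(children_continue_blocks_list[i])
--         if n > 1:
--             if seen_multiple or seen_one:
--                 return False
--             return go(i + 1, seen_one, True)
--         if n == 1:
--             if seen_multiple:
--                 return False
--             return go(i + 1, True, seen_multiple)
--         return go(i + 1, seen_one, seen_multiple)
--     return go(0, False, False)
-- ===== Notes on version B (the rewrite author's own statement) =====
-- stated objective: alternative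
-- what changed: Replaces A's count-everything-then-test cascade with a short-circuit recursive state machine over two boolean flags (seen_one, seen_multiple) that returns False immediately when a second multi-block or a multi-block/singleton conflict is detected, without maintaining any counters.
import Mathlib
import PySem

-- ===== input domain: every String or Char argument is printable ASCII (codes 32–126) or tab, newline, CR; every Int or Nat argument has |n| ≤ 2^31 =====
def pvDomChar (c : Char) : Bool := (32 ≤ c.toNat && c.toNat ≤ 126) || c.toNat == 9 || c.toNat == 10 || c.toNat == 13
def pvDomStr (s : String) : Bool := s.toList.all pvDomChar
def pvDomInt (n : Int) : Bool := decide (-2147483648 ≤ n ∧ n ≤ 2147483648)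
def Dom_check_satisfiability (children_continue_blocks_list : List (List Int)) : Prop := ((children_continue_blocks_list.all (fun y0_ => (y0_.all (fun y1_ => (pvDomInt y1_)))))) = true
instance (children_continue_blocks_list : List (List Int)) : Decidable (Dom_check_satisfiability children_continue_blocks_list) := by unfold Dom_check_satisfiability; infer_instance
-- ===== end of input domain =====

-- B replaces A's count-then-test cascade with a short-circuit recursive scan over
-- two boolean flags, returning False as soon as a conflict is certain (alternative).

-- ===== PORT A =====
def check_satisfiability (children_continue_blocks_list : List (List Int)) : Bool :=
  let st := children_continue_blocks_list.foldl
    (fun (acc : Int × Int × Int) b =>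
      if b.length = 0 then (acc.1 + 1, acc.2.1, acc.2.2)
      else if b.length = 1 then (acc.1, acc.2.1 + 1, acc.2.2)
      else if b.length > 1 then (acc.1, acc.2.1, acc.2.2 + 1)
      else acc)
    (0, 0, 0)
  if st.2.2 > 1 then false
  else if st.2.2 = 1 then
    if st.2.1 > 0 then false else true
  else true

-- ===== PORT B =====
-- the inner recursive scanner `go` of Source B (index recursion rendered structurally)
def check_satisfiability_go (rest : List (List Int)) (seen_one seen_multiple : Bool) : Bool :=
  match rest with
  | [] => true
  | b :: tl =>
    if b.length > 1 then
      if seen_multiple || seen_one then false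
      else check_satisfiability_go tl seen_one true
    else if b.length = 1 then
      if seen_multiple then false
      else check_satisfiability_go tl true seen_multiple
    else check_satisfiability_go tl seen_one seen_multiple

def check_satisfiability_alt (children_continue_blocks_list : List (List Int)) : Bool :=
  check_satisfiability_go children_continue_blocks_list false false

-- ===== PRECONDITION & SPEC =====
def Spec_check_satisfiability (children_continue_blocks_list : List (List Int)) (out : Bool) : Prop := out = check_satisfiability_alt children_continue_blocks_list
instance (children_continue_blocks_list : List (List Int)) (out : Bool) : Decidable (Spec_check_satisfiability children_continue_blocks_list out) := by unfold Spec_check_satisfiability; infer_instance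

-- ===== CLAIM (what is proved, stated in full; the proofs are below) =====
def Claim_equal_check_satisfiability : Prop := ∀ (children_continue_blocks_list : List (List Int)), Dom_check_satisfiability children_continue_blocks_list → Spec_check_satisfiability children_continue_blocks_list (check_satisfiability children_continue_blocks_list)

-- ===== LEMMAS AND PROOFS =====

-- A's fold just adds the three counts to the initial state.
theorem pv_fold_char (l : List (List Int)) (z o m : Int) :
    l.foldl
      (fun (acc : Int × Int × Int) b =>
        if b.length = 0 then (acc.1 + 1, acc.2.1, acc.2.2)
        else if b.length = 1 then (acc.1, acc.2.1 + 1, acc.2.2)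
        else if b.length > 1 then (acc.1, acc.2.1, acc.2.2 + 1)
        else acc)
      (z, o, m)
    = (z + (l.countP (fun b => b.length = 0) : Nat),
       o + (l.countP (fun b => b.length = 1) : Nat),
       m + (l.countP (fun b => b.length > 1) : Nat)) := by
  induction l generalizing z o m with
  | nil => simp
  | cons hd tl ih =>
    rw [List.foldl_cons]
    by_cases h0 : hd.length = 0
    · rw [if_pos h0, ih]
      simp only [List.countP_cons, h0, Prod.mk.injEq]
      refine ⟨?_, ?_, ?_⟩ <;> simp <;> ring
    · by_cases h1 : hd.length = 1
      · rw [if_neg h0, if_pos h1, ih]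
        simp only [List.countP_cons, h1, Prod.mk.injEq]
        refine ⟨?_, ?_, ?_⟩ <;> simp [h0] <;> ring
      · have hgt : hd.length > 1 := by omega
        rw [if_neg h0, if_neg h1, if_pos hgt, ih]
        simp only [List.countP_cons, Prod.mk.injEq]
        refine ⟨?_, ?_, ?_⟩ <;> simp [h0, h1, hgt] <;> ring

-- Closed-form characterisation of B's scanner in terms of the two counts.
theorem pv_go_char (l : List (List Int)) (so sm : Bool) :
    check_satisfiability_go l so sm =
      (if sm then decide (l.countP (fun b => b.length > 1) = 0 ∧ l.countP (fun b => b.length = 1) = 0)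
       else if so then decide (l.countP (fun b => b.length > 1) = 0)
       else decide (l.countP (fun b => b.length > 1) ≤ 1 ∧
              (l.countP (fun b => b.length > 1) = 0 ∨ l.countP (fun b => b.length = 1) = 0))) := by
  induction l generalizing so sm with
  | nil => cases so <;> cases sm <;> simp [check_satisfiability_go]
  | cons hd tl ih =>
    by_cases hgt : hd.length > 1
    · have h1 : ¬ hd.length = 1 := by omega
      cases so <;> cases sm <;>
        simp [check_satisfiability_go, hgt, h1, List.countP_cons, ih] <;>
        first
          | omega
          | (rw [Bool.eq_iff_iff]
             simp only [decide_eq_true_eq, Bool.and_eq_true, Bool.or_eq_true, Bool.false_eq_true, Bool.true_eq_false]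
             omega)
          | (intro h
             have hz : List.countP (fun b => decide (1 < b.length)) tl = 0 :=
               List.countP_eq_zero.mpr (by intro a ha; simpa using Nat.not_lt.mpr (by simpa using h a ha))
             omega)
    · by_cases h1 : hd.length = 1
      · cases so <;> cases sm <;>
          simp [check_satisfiability_go, hgt, h1, List.countP_cons, ih] <;>
        first
          | omega
          | (rw [Bool.eq_iff_iff]
             simp only [decide_eq_true_eq, Bool.and_eq_true, Bool.or_eq_true, Bool.false_eq_true, Bool.true_eq_false]
             omega)
          | (intro h
             have hz : List.countP (fun b => decide (1 < b.length)) tl = 0 :=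
               List.countP_eq_zero.mpr (by intro a ha; simpa using Nat.not_lt.mpr (by simpa using h a ha))
             omega)
      · cases so <;> cases sm <;>
          simp [check_satisfiability_go, hgt, h1, List.countP_cons, ih]

theorem pv_main (o m : Nat) :
    (if (m : Int) > 1 then false
     else if (m : Int) = 1 then (if (o : Int) > 0 then false else true)
     else true)
    = decide (m ≤ 1 ∧ (m = 0 ∨ o = 0)) := by
  split_ifs <;> simp_all <;> omega

-- ===== VERDICT (by name: the statement is the Claim_ definition above) =====
theorem check_satisfiability_spec : Claim_equal_check_satisfiability := by
  intro l _
  unfold Spec_check_satisfiability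
  simp only [check_satisfiability, check_satisfiability_alt]
  rw [pv_fold_char, pv_go_char]
  simp only [zero_add, Bool.false_eq_true, if_false]
  exact pv_main _ _
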